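-- pv_equiv track=rewrite | github.com/DilyanTsenkov/SoftUni-Software-Engineering | Python_Advanced/Exam_24_October_2020/02_checkmate.py | row_checker
-- ===== SOURCE A (Python) =====
-- def row_checker(chess_board, k_row, k_col, queens_can_capture):
--     for i in range(-1, 2, 2):
--         temp_c = k_col + i
--         while 0 <= temp_c < 8:
--             if chess_board[k_row][temp_c] == "Q":
--                 queen_coord = [k_row, temp_c]
--                 queens_can_capture.append(queen_coord)
--                 break
--             temp_c += i
--     return queens_can_capture
-- ===== SOURCE B (Python) =====
-- def row_checker(chess_board, k_row, k_col, queens_can_capture):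
--     # A king standing outside the board's files cannot be captured along its row.
--     if k_col not in range(8):
--         return queens_can_capture
--     # Scan the king's row once, collecting every queen's column; the capturing
--     # queens are the nearest one on each side of the king.
--     queen_cols = [c for c, piece in enumerate(chess_board[k_row]) if piece == "Q"]
--     left = max((c for c in queen_cols if c < k_col), default=None)
--     right = min((c for c in queen_cols if c > k_col), default=None)
--     if left is not None:
--         queens_can_capture.append([k_row, left])
--     if right is not None:
--         queens_can_capture.append([k_row, right])
--     return queens_can_capture
-- ===== Notes on version B (the rewrite author's own statement) =====
-- stated objective: alternative
-- what changed: A walks left then right from the king's column with two directional bounded while-scans stopping at the first queen; B first requires the king to stand on a board file (0..7), then scans the king's row once collecting all queen columns and selects the left capture as the max collected column below k_col and the right as the min above it.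
-- intended difference: On inputs where A's hard-coded 0..7 scan windows disagree with the given board — a king just off the files (k_col = -1 or 8) with a queen among the row's first 8 squares, or a king on a file whose only rightward queen sits beyond column 7 of an over-wide row — A reports a capture of an off-board king (resp. silently drops that queen) while B reports no capture (resp. that queen), which is the intended reading since a king off the board cannot be captured and the row should be read as given. — e.g. on row_checker([["Q"]], 0, -1, []): A returns [[0, 0]], B returns []
import Mathlib
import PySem

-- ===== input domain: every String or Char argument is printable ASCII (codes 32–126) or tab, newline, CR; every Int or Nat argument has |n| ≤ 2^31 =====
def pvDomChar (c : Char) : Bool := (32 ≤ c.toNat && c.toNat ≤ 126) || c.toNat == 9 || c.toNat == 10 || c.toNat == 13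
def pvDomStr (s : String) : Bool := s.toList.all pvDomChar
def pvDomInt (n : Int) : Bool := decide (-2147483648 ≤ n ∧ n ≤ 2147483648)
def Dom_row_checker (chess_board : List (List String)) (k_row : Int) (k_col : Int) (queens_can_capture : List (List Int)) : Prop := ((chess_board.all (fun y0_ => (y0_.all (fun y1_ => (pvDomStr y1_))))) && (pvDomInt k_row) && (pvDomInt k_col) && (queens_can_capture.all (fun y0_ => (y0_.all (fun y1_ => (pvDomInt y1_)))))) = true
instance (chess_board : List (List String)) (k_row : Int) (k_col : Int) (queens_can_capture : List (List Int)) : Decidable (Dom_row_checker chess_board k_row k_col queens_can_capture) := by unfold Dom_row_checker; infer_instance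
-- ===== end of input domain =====

-- B collects the queen columns of the king's row in one pass and picks the nearest left/right
-- capture by max/min instead of A's two directional while-scans, after requiring the king to
-- stand on a board file (objective: alternative, same cost). Both A and B append to the
-- queens_can_capture argument in place identically; the equivalence proved here is about the
-- return value.

-- ===== PORT A =====
-- the 'while 0 <= temp_c < 8: … temp_c += i' loop; it checks at most the 8 in-range columns,
-- so fuel 9 is never exhausted
def rcScanA (chess_board : List (List String)) (k_row : Int) (i : Int) : Int → Nat → Option Int
  | _, 0 => none
  | temp_c, fuel + 1 =>
    if 0 ≤ temp_c ∧ temp_c < 8 then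
      if ((PySem.List.pyGet? chess_board k_row).bind (fun r => PySem.List.pyGet? r temp_c)) = some "Q" then
        some temp_c
      else rcScanA chess_board k_row i (temp_c + i) fuel
    else none

def row_checker (chess_board : List (List String)) (k_row : Int) (k_col : Int) (queens_can_capture : List (List Int)) : List (List Int) :=
  let q1 := match rcScanA chess_board k_row (-1) (k_col + (-1)) 9 with
    | some c => queens_can_capture ++ [[k_row, c]]
    | none => queens_can_capture
  match rcScanA chess_board k_row 1 (k_col + 1) 9 with
    | some c => q1 ++ [[k_row, c]]
    | none => q1

-- ===== PORT B =====
def row_checker_alt (chess_board : List (List String)) (k_row : Int) (k_col : Int) (queens_can_capture : List (List Int)) : List (List Int) :=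
  -- 'if k_col not in range(8): return queens_can_capture'
  if ¬ (0 ≤ k_col ∧ k_col < 8) then queens_can_capture
  else
    let row := (PySem.List.pyGet? chess_board k_row).getD []
    let queen_cols : List Int :=
      ((PySem.List.enumerate row 0).filter (fun p => p.2 == "Q")).map (fun p => p.1)
    let left := PySem.List.max? (queen_cols.filter (fun c => decide (c < k_col))) (fun y => y)
    let right := PySem.List.min? (queen_cols.filter (fun c => decide (k_col < c))) (fun y => y)
    let q1 := match left with
      | some l => queens_can_capture ++ [[k_row, l]]
      | none => queens_can_capture
    match right with
      | some r => q1 ++ [[k_row, r]]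
      | none => q1

-- ===== PRECONDITION & SPEC =====
-- Pre_ is exactly the set of inputs on which A returns (no IndexError): whenever a directional
-- scan starts on a board file (0 ≤ k_col∓1 < 8), k_row must be a valid Python index and that
-- scan must stay inside the indexed row (downward: k_col is at most the row length; upward:
-- the row has 8 squares, or a queen occurs in it at or after column k_col+1).
def Pre_row_checker (chess_board : List (List String)) (k_row : Int) (k_col : Int) (queens_can_capture : List (List Int)) : Prop :=
  ((0 ≤ k_col - 1 ∧ k_col - 1 < 8) →
    (PySem.Raise.InRange chess_board.length k_row ∧
      k_col ≤ (((PySem.List.pyGet? chess_board k_row).getD []).length : Int))) ∧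
  ((0 ≤ k_col + 1 ∧ k_col + 1 < 8) →
    (PySem.Raise.InRange chess_board.length k_row ∧
      (8 ≤ ((PySem.List.pyGet? chess_board k_row).getD []).length ∨
        ∃ c ∈ List.range ((PySem.List.pyGet? chess_board k_row).getD []).length,
          (k_col + 1 ≤ (c : Int) ∧
            PySem.List.pyGet? ((PySem.List.pyGet? chess_board k_row).getD []) (c : Int) = some "Q"))))
instance (chess_board : List (List String)) (k_row : Int) (k_col : Int) (queens_can_capture : List (List Int)) : Decidable (Pre_row_checker chess_board k_row k_col queens_can_capture) := by unfold Pre_row_checker; infer_instance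

def pvWitness_row_checker : List (List String) × Int × Int × List (List Int) :=
  ([["Q", ".", ".", ".", ".", "Q", ".", "."]], 0, 3, [])

-- On inputs where A's hard-coded 0..7 scan windows disagree with the given board — a king just
-- off the board's files (k_col = -1 or 8) with a queen on its row, or a king on a board file
-- whose only rightward queen sits beyond column 7 of an over-wide row — A reports a capture of
-- an off-board king (resp. silently drops the queen) while B, which requires the king to stand
-- on a board file and reads the row as given, reports no capture (resp. that queen), the
-- intended reading of capture along the row.
def D_row_checker (chess_board : List (List String)) (k_row : Int) (k_col : Int) (queens_can_capture : List (List Int)) : Prop :=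
  let r := (PySem.List.pyGet? chess_board k_row).getD []
  ((k_col = -1 ∨ k_col = 8) ∧ "Q" ∈ r.take 8) ∨
  (0 ≤ k_col ∧ k_col < 8 ∧ "Q" ∈ r.drop 8 ∧ "Q" ∉ (r.take 8).drop (k_col + 1).toNat)
instance (chess_board : List (List String)) (k_row : Int) (k_col : Int) (queens_can_capture : List (List Int)) : Decidable (D_row_checker chess_board k_row k_col queens_can_capture) := by unfold D_row_checker; infer_instance

def Spec_row_checker (chess_board : List (List String)) (k_row : Int) (k_col : Int) (queens_can_capture : List (List Int)) (out : List (List Int)) : Prop := ¬ D_row_checker chess_board k_row k_col queens_can_capture → out = row_checker_alt chess_board k_row k_col queens_can_capture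
instance (chess_board : List (List String)) (k_row : Int) (k_col : Int) (queens_can_capture : List (List Int)) (out : List (List Int)) : Decidable (Spec_row_checker chess_board k_row k_col queens_can_capture out) := by unfold Spec_row_checker; infer_instance

def pvDiffWitness_row_checker : List (List String) × Int × Int × List (List Int) :=
  ([["Q"]], 0, -1, [])
def pvDiffWitnessOut_row_checker : (List (List Int)) × (List (List Int)) := ([[0, 0]], [])

-- ===== CLAIM (what is proved, stated in full; the proofs are below) =====
def Claim_unchanged_row_checker : Prop := ∀ (chess_board : List (List String)) (k_row : Int) (k_col : Int) (queens_can_capture : List (List Int)), Dom_row_checker chess_board k_row k_col queens_can_capture → Pre_row_checker chess_board k_row k_col queens_can_capture → Spec_row_checker chess_board k_row k_col queens_can_capture (row_checker chess_board k_row k_col queens_can_capture)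
def Claim_changed_row_checker : Prop := Dom_row_checker (pvDiffWitness_row_checker.1) (pvDiffWitness_row_checker.2.1) (pvDiffWitness_row_checker.2.2.1) (pvDiffWitness_row_checker.2.2.2) ∧ Pre_row_checker (pvDiffWitness_row_checker.1) (pvDiffWitness_row_checker.2.1) (pvDiffWitness_row_checker.2.2.1) (pvDiffWitness_row_checker.2.2.2) ∧ D_row_checker (pvDiffWitness_row_checker.1) (pvDiffWitness_row_checker.2.1) (pvDiffWitness_row_checker.2.2.1) (pvDiffWitness_row_checker.2.2.2) ∧ row_checker (pvDiffWitness_row_checker.1) (pvDiffWitness_row_checker.2.1) (pvDiffWitness_row_checker.2.2.1) (pvDiffWitness_row_checker.2.2.2) = pvDiffWitnessOut_row_checker.1 ∧ row_checker_alt (pvDiffWitness_row_checker.1) (pvDiffWitness_row_checker.2.1) (pvDiffWitness_row_checker.2.2.1) (pvDiffWitness_row_checker.2.2.2) = pvDiffWitnessOut_row_checker.2 ∧ pvDiffWitnessOut_row_checker.1 ≠ pvDiffWitnessOut_row_checker.2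
def Claim_exact_row_checker : Prop := ∀ (chess_board : List (List String)) (k_row : Int) (k_col : Int) (queens_can_capture : List (List Int)), Dom_row_checker chess_board k_row k_col queens_can_capture → Pre_row_checker chess_board k_row k_col queens_can_capture → D_row_checker chess_board k_row k_col queens_can_capture → row_checker chess_board k_row k_col queens_can_capture ≠ row_checker_alt chess_board k_row k_col queens_can_capture

-- ===== LEMMAS AND PROOFS =====

-- A's downward scan from s finds the greatest queen column ≤ s, i.e. the last element of the
-- ascending list of queen columns at most s.
theorem scanA_down (cb : List (List String)) (k_row : Int) (row : List String)
    (hrow : PySem.List.pyGet? cb k_row = some row) :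
    ∀ (fuel : Nat) (s : Int), s < 8 → s < (fuel : Int) →
      rcScanA cb k_row (-1) s fuel =
        (((List.range 8).filter
            (fun k : Nat => decide ((k : Int) ≤ s ∧ PySem.List.pyGet? row (k : Int) = some "Q"))).map
          (fun k : Nat => ((k : Int)))).getLast? := by
  intro fuel
  induction fuel with
  | zero =>
    intro s h8 hf
    have hs : s < 0 := by exact_mod_cast hf
    rw [rcScanA]
    have : List.filter
        (fun k : Nat => decide ((k : Int) ≤ s ∧ PySem.List.pyGet? row (k : Int) = some "Q"))
        (List.range 8) = [] := by
      apply List.filter_eq_nil_iff.mpr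
      intro a _
      simp only [decide_eq_true_eq, not_and]
      intro hle _; omega
    rw [this]; rfl
  | succ f ih =>
    intro s h8 hf
    by_cases hs : 0 ≤ s
    · rw [rcScanA, if_pos ⟨hs, h8⟩, hrow, Option.bind_some]
      by_cases hP : PySem.List.pyGet? row s = some "Q"
      · rw [if_pos hP]
        have ht : ((s.toNat : Nat) : Int) = s := Int.toNat_of_nonneg hs
        have hsplit : List.range 8 = List.range (s.toNat + 1) ++
            List.map (fun x => (s.toNat + 1) + x) (List.range (7 - s.toNat)) := by
          rw [← List.range_add]; congr 1; omega
        rw [hsplit, List.filter_append, List.range_succ, List.filter_append]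
        have hfl : List.filter
            (fun k : Nat => decide ((k : Int) ≤ s ∧ PySem.List.pyGet? row (k : Int) = some "Q"))
            (List.map (fun x => (s.toNat + 1) + x) (List.range (7 - s.toNat))) = [] := by
          apply List.filter_eq_nil_iff.mpr
          intro a ha
          obtain ⟨x, _, rfl⟩ := List.mem_map.mp ha
          simp only [decide_eq_true_eq, not_and]
          intro hle _; omega
        have hP' : row[s.toNat]? = some "Q" := by
          rw [← PySem.List.pyGet?_natCast, ht]; exact hP
        have hft : List.filter
            (fun k : Nat => decide ((k : Int) ≤ s ∧ PySem.List.pyGet? row (k : Int) = some "Q"))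
            [s.toNat] = [s.toNat] := by
          simp [ht, hP']
        rw [hfl, hft, List.append_nil, List.map_append]
        simp [ht]
      · rw [if_neg hP, ih (s + -1) (by omega) (by omega)]
        congr 2
        apply List.filter_congr
        intro k hk
        apply decide_eq_decide.mpr
        constructor
        · rintro ⟨hle, hq⟩; exact ⟨by omega, hq⟩
        · rintro ⟨hle, hq⟩
          refine ⟨?_, hq⟩
          by_cases hks : (k : Int) = s
          · exact absurd (hks ▸ hq) hP
          · omega
    · rw [rcScanA, if_neg (by omega)]
      have : List.filter
          (fun k : Nat => decide ((k : Int) ≤ s ∧ PySem.List.pyGet? row (k : Int) = some "Q"))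
          (List.range 8) = [] := by
        apply List.filter_eq_nil_iff.mpr
        intro a _
        simp only [decide_eq_true_eq, not_and]
        intro hle _; omega
      rw [this]; rfl

-- A's upward scan from s finds the least queen column ≥ s, i.e. the head of the ascending list
-- of queen columns at least s.
theorem scanA_up (cb : List (List String)) (k_row : Int) (row : List String)
    (hrow : PySem.List.pyGet? cb k_row = some row) :
    ∀ (fuel : Nat) (s : Int), 0 ≤ s → 8 ≤ (fuel : Int) + s →
      rcScanA cb k_row 1 s fuel =
        (((List.range 8).filter
            (fun k : Nat => decide (s ≤ (k : Int) ∧ PySem.List.pyGet? row (k : Int) = some "Q"))).map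
          (fun k : Nat => ((k : Int)))).head? := by
  intro fuel
  induction fuel with
  | zero =>
    intro s hs hf
    rw [rcScanA]
    have : List.filter
        (fun k : Nat => decide (s ≤ (k : Int) ∧ PySem.List.pyGet? row (k : Int) = some "Q"))
        (List.range 8) = [] := by
      apply List.filter_eq_nil_iff.mpr
      intro a ha
      have := List.mem_range.mp ha
      simp only [decide_eq_true_eq, not_and]
      intro hle _; omega
    rw [this]; rfl
  | succ f ih =>
    intro s hs hf
    by_cases h8 : s < 8
    · rw [rcScanA, if_pos ⟨hs, h8⟩, hrow, Option.bind_some]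
      by_cases hP : PySem.List.pyGet? row s = some "Q"
      · rw [if_pos hP]
        have ht : ((s.toNat : Nat) : Int) = s := Int.toNat_of_nonneg hs
        have hP' : row[s.toNat]? = some "Q" := by
          rw [← PySem.List.pyGet?_natCast, ht]; exact hP
        have hsplit : List.range 8 = List.range s.toNat ++
            List.map (fun x => s.toNat + x) (List.range (8 - s.toNat)) := by
          rw [← List.range_add]; congr 1; omega
        rw [hsplit, List.filter_append]
        have hfl : List.filter
            (fun k : Nat => decide (s ≤ (k : Int) ∧ PySem.List.pyGet? row (k : Int) = some "Q"))
            (List.range s.toNat) = [] := by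
          apply List.filter_eq_nil_iff.mpr
          intro a ha
          have := List.mem_range.mp ha
          simp only [decide_eq_true_eq, not_and]
          intro hle _; omega
        have hm : (8 - s.toNat) = (7 - s.toNat) + 1 := by omega
        rw [hfl, List.nil_append, hm, List.range_succ_eq_map]
        simp only [List.map_cons, List.filter_cons]
        rw [if_pos (by simp [ht, hP])]
        simp [ht]
      · rw [if_neg hP, ih (s + 1) (by omega) (by omega)]
        congr 2
        apply List.filter_congr
        intro k hk
        apply decide_eq_decide.mpr
        constructor
        · rintro ⟨hle, hq⟩; exact ⟨by omega, hq⟩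
        · rintro ⟨hle, hq⟩
          refine ⟨?_, hq⟩
          by_cases hks : (k : Int) = s
          · exact absurd (hks ▸ hq) hP
          · omega
    · rw [rcScanA, if_neg (by omega)]
      have : List.filter
          (fun k : Nat => decide (s ≤ (k : Int) ∧ PySem.List.pyGet? row (k : Int) = some "Q"))
          (List.range 8) = [] := by
        apply List.filter_eq_nil_iff.mpr
        intro a ha
        have := List.mem_range.mp ha
        simp only [decide_eq_true_eq, not_and]
        intro hle _; omega
      rw [this]; rfl

-- the directional scan does nothing when its start square is off the board
theorem scan_dead (cb : List (List String)) (k_row i s : Int) (h : ¬ (0 ≤ s ∧ s < 8)) :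
    rcScanA cb k_row i s 9 = none := by
  rw [show (9 : Nat) = 8 + 1 from rfl, rcScanA, if_neg h]

-- B's enumerate-filter-map pass equals the filtered index range.
theorem enumQ (l : List String) : ∀ (s : Int),
    ((PySem.List.enumerate l s).filter (fun p => p.2 == "Q")).map (fun p => p.1) =
      ((List.range l.length).filter (fun k : Nat => l[k]? == some "Q")).map
        (fun k : Nat => s + (k : Int)) := by
  induction l with
  | nil => intro s; simp [PySem.List.enumerate]
  | cons x t ihl =>
    intro s
    rw [PySem.List.enumerate_cons, List.filter_cons]
    have hlen : (x :: t).length = t.length + 1 := rfl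
    rw [hlen, List.range_succ_eq_map, List.filter_cons]
    by_cases hx : (x == "Q") = true
    · simp only [hx, if_pos]
      have : ((x :: t)[0]? == some "Q") = true := by simpa using hx
      rw [this, if_pos rfl]
      simp only [List.map_cons]
      congr 1
      · simp
      · rw [ihl (s + 1), List.filter_map, List.map_map]
        congr 1
        funext k; simp; ring
    · simp only [hx, if_neg, Bool.false_eq_true, not_false_iff]
      have : ¬ ((x :: t)[0]? == some "Q") = true := by simpa using hx
      rw [if_neg this]
      rw [ihl (s + 1), List.filter_map, List.map_map]
      congr 1
      funext k; simp; ring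

theorem foldl_max_last : ∀ (t : List Int) (x : Int),
    List.Pairwise (· < ·) (x :: t) → List.foldl max x t = (x :: t).getLast (List.cons_ne_nil x t) := by
  intro t
  induction t with
  | nil => intro x _; simp
  | cons y t ih =>
    intro x h
    obtain ⟨hx, ht⟩ := List.pairwise_cons.mp h
    rw [List.foldl_cons, max_eq_right (hx y (by simp)).le, ih y ht]
    simp [List.getLast_cons]

theorem foldl_min_self : ∀ (t : List Int) (x : Int), (∀ y ∈ t, x < y) → List.foldl min x t = x := by
  intro t
  induction t with
  | nil => intro x _; rfl
  | cons y t ih =>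
    intro x h
    rw [List.foldl_cons, min_eq_left (h y (by simp)).le]
    exact ih x (fun z hz => h z (by simp [hz]))

-- Python's max (first maximum) on a strictly increasing list is its last element.
theorem max?_sorted (l : List Int) (h : List.Pairwise (· < ·) l) :
    PySem.List.max? l (fun y => y) = l.getLast? := by
  cases l with
  | nil => rfl
  | cons x t =>
    rw [PySem.List.max?_id_cons, foldl_max_last t x h, List.getLast?_eq_some_getLast]

-- Python's min (first minimum) on a strictly increasing list is its head.
theorem min?_sorted (l : List Int) (h : List.Pairwise (· < ·) l) :
    PySem.List.min? l (fun y => y) = l.head? := by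
  cases l with
  | nil => rfl
  | cons x t =>
    rw [PySem.List.min?_id_cons, foldl_min_self t x (List.pairwise_cons.mp h).1]
    rfl

-- a filtered range does not change when the range is extended past where the predicate dies
theorem filter_range_ext (P : Nat → Bool) (n m : Nat) (h : n ≤ m)
    (hP : ∀ k, n ≤ k → P k = false) :
    (List.range m).filter P = (List.range n).filter P := by
  have hs : List.range m = List.range n ++ (List.range (m - n)).map (fun x => n + x) := by
    rw [← List.range_add]; congr 1; omega
  rw [hs, List.filter_append]
  have : ((List.range (m - n)).map (fun x => n + x)).filter P = [] := by
    apply List.filter_eq_nil_iff.mpr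
    intro a ha
    obtain ⟨x, _, rfl⟩ := List.mem_map.mp ha
    simp [hP (n + x) (by omega)]
  rw [this, List.append_nil]

-- the first hit of P below 8 and below L coincide when P dies past L and either a hit exists
-- below 8 or none exists at 8 and beyond
theorem head?_transfer (P : Nat → Bool) (L : Nat)
    (hPL : ∀ k, L ≤ k → P k = false)
    (h : (∃ k, k < 8 ∧ P k = true) ∨ (∀ k, 8 ≤ k → P k = false)) :
    ((List.range L).filter P).head? = ((List.range 8).filter P).head? := by
  have h1 : (List.range L).filter P = (List.range (max 8 L)).filter P :=
    (filter_range_ext P L (max 8 L) (le_max_right _ _) hPL).symm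
  rcases h with ⟨k0, hk08, hk0P⟩ | hbig
  · have h2 : List.range (max 8 L) = List.range 8 ++ (List.range (max 8 L - 8)).map (fun x => 8 + x) := by
      rw [← List.range_add]; congr 1; omega
    rw [h1, h2, List.filter_append]
    have hne : (List.range 8).filter P ≠ [] :=
      List.ne_nil_of_mem (List.mem_filter.mpr ⟨List.mem_range.mpr hk08, hk0P⟩)
    cases hfl : (List.range 8).filter P with
    | nil => exact absurd hfl hne
    | cons a t => simp
  · rw [h1, filter_range_ext P 8 (max 8 L) (le_max_left _ _) hbig]

-- B's left selection, rewritten to A's characterization (the last queen column ≤ k_col-1 on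
-- the 8 board files)
theorem B_left_char (row : List String) (kc : Int) (hk : kc ≤ 8) :
    PySem.List.max? (((((PySem.List.enumerate row 0).filter (fun p => p.2 == "Q")).map
        (fun p => p.1)).filter (fun c => decide (c < kc)))) (fun y => y)
      = (((List.range 8).filter
          (fun k : Nat => decide ((k : Int) ≤ kc + -1 ∧ PySem.List.pyGet? row (k : Int) = some "Q"))).map
        (fun k : Nat => ((k : Int)))).getLast? := by
  rw [enumQ row 0]
  simp only [zero_add]
  rw [List.filter_map, List.filter_filter]
  have hdl : ∀ k ∈ List.range row.length,
      (((fun c : Int => decide (c < kc)) ∘ (fun k : Nat => ((k : Int)))) k && (row[k]? == some "Q"))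
        = decide ((k : Int) ≤ kc + -1 ∧ PySem.List.pyGet? row (k : Int) = some "Q") := by
    intro k _
    have hpg : PySem.List.pyGet? row (k : Int) = row[k]? := PySem.List.pyGet?_natCast row k
    by_cases hq : row[k]? = some "Q" <;> by_cases hl : (k : Int) < kc <;>
      simp [hq, hl, hpg, Function.comp] <;> omega
  rw [List.filter_congr hdl]
  have hext1 : (List.range row.length).filter
      (fun k : Nat => decide ((k : Int) ≤ kc + -1 ∧ PySem.List.pyGet? row (k : Int) = some "Q"))
      = (List.range (max 8 row.length)).filter
      (fun k : Nat => decide ((k : Int) ≤ kc + -1 ∧ PySem.List.pyGet? row (k : Int) = some "Q")) := by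
    refine (filter_range_ext _ _ _ (le_max_right _ _) ?_).symm
    intro k hkL
    have : row[k]? = none := List.getElem?_eq_none hkL
    simp [PySem.List.pyGet?_natCast, this]
  have hext2 : (List.range (max 8 row.length)).filter
      (fun k : Nat => decide ((k : Int) ≤ kc + -1 ∧ PySem.List.pyGet? row (k : Int) = some "Q"))
      = (List.range 8).filter
      (fun k : Nat => decide ((k : Int) ≤ kc + -1 ∧ PySem.List.pyGet? row (k : Int) = some "Q")) := by
    refine filter_range_ext _ _ _ (le_max_left _ _) ?_
    intro k hk8
    have : ¬ ((k : Int) ≤ kc + -1) := by omega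
    simp [this]
  rw [hext1, hext2]
  exact max?_sorted _ ((List.pairwise_lt_range.filter _).map _ (fun a b hab => by exact_mod_cast hab))

-- B's right selection, rewritten to the first queen column ≥ k_col+1 of the whole row
theorem B_right_char (row : List String) (kc : Int) :
    PySem.List.min? (((((PySem.List.enumerate row 0).filter (fun p => p.2 == "Q")).map
        (fun p => p.1)).filter (fun c => decide (kc < c)))) (fun y => y)
      = (((List.range row.length).filter
          (fun k : Nat => decide (kc + 1 ≤ (k : Int) ∧ PySem.List.pyGet? row (k : Int) = some "Q"))).map
        (fun k : Nat => ((k : Int)))).head? := by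
  rw [enumQ row 0]
  simp only [zero_add]
  rw [List.filter_map, List.filter_filter]
  have hdr : ∀ k ∈ List.range row.length,
      (((fun c : Int => decide (kc < c)) ∘ (fun k : Nat => ((k : Int)))) k && (row[k]? == some "Q"))
        = decide (kc + 1 ≤ (k : Int) ∧ PySem.List.pyGet? row (k : Int) = some "Q") := by
    intro k _
    have hpg : PySem.List.pyGet? row (k : Int) = row[k]? := PySem.List.pyGet?_natCast row k
    by_cases hq : row[k]? = some "Q" <;> by_cases hl : kc < (k : Int) <;>
      simp [hq, hl, hpg, Function.comp] <;> omega
  rw [List.filter_congr hdr]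
  exact min?_sorted _ ((List.pairwise_lt_range.filter _).map _ (fun a b hab => by exact_mod_cast hab))

-- a queen column is a valid index of the row
theorem qcol_lt (row : List String) (k : Nat) (h : PySem.List.pyGet? row (k : Int) = some "Q") :
    k < row.length := by
  rw [PySem.List.pyGet?_natCast] at h
  exact (List.getElem?_eq_some_iff.mp h).1

-- membership of "Q" in take/drop segments, as indexed existentials
theorem memTake_iff (r : List String) :
    "Q" ∈ r.take 8 ↔ ∃ c ∈ List.range r.length,
      ((c : Int) < 8 ∧ PySem.List.pyGet? r (c : Int) = some "Q") := by
  constructor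
  · intro h
    obtain ⟨i, hi⟩ := List.mem_iff_getElem?.mp h
    have hl : i < (r.take 8).length := (List.getElem?_eq_some_iff.mp hi).1
    have hi8 : i < 8 := by simp [List.length_take] at hl; omega
    have hiL : i < r.length := by simp [List.length_take] at hl; omega
    refine ⟨i, List.mem_range.mpr hiL, by exact_mod_cast hi8, ?_⟩
    rw [PySem.List.pyGet?_natCast, ← List.getElem?_take_of_lt hi8]
    exact hi
  · rintro ⟨c, hcm, hc8, hcQ⟩
    have hc8' : c < 8 := by exact_mod_cast hc8
    apply List.mem_iff_getElem?.mpr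
    refine ⟨c, ?_⟩
    rw [List.getElem?_take_of_lt hc8', ← PySem.List.pyGet?_natCast]
    exact hcQ

theorem memDrop_iff (r : List String) :
    "Q" ∈ r.drop 8 ↔ ∃ c ∈ List.range r.length,
      (8 ≤ (c : Int) ∧ PySem.List.pyGet? r (c : Int) = some "Q") := by
  constructor
  · intro h
    obtain ⟨i, hi⟩ := List.mem_iff_getElem?.mp h
    rw [List.getElem?_drop] at hi
    have hiL : 8 + i < r.length := (List.getElem?_eq_some_iff.mp hi).1
    refine ⟨8 + i, List.mem_range.mpr hiL, by omega, ?_⟩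
    rw [PySem.List.pyGet?_natCast]
    exact hi
  · rintro ⟨c, hcm, hc8, hcQ⟩
    have hc8' : 8 ≤ c := by exact_mod_cast hc8
    apply List.mem_iff_getElem?.mpr
    refine ⟨c - 8, ?_⟩
    rw [List.getElem?_drop, show 8 + (c - 8) = c by omega, ← PySem.List.pyGet?_natCast]
    exact hcQ

theorem memMid_iff (r : List String) (kc : Int) (hk : 0 ≤ kc) :
    "Q" ∈ (r.take 8).drop (kc + 1).toNat ↔ ∃ c ∈ List.range r.length,
      (kc + 1 ≤ (c : Int) ∧ (c : Int) < 8 ∧ PySem.List.pyGet? r (c : Int) = some "Q") := by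
  constructor
  · intro h
    obtain ⟨i, hi⟩ := List.mem_iff_getElem?.mp h
    rw [List.getElem?_drop] at hi
    have hl : (kc + 1).toNat + i < (r.take 8).length := (List.getElem?_eq_some_iff.mp hi).1
    have h8 : (kc + 1).toNat + i < 8 := by simp [List.length_take] at hl; omega
    have hL : (kc + 1).toNat + i < r.length := by simp [List.length_take] at hl; omega
    rw [List.getElem?_take_of_lt h8] at hi
    refine ⟨(kc + 1).toNat + i, List.mem_range.mpr hL, by push_cast; omega, by push_cast; omega, ?_⟩
    rw [PySem.List.pyGet?_natCast]
    exact hi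
  · rintro ⟨c, hcm, hc1, hc8, hcQ⟩
    have hc8' : c < 8 := by exact_mod_cast hc8
    apply List.mem_iff_getElem?.mpr
    refine ⟨c - (kc + 1).toNat, ?_⟩
    rw [List.getElem?_drop, show (kc + 1).toNat + (c - (kc + 1).toNat) = c by omega,
      List.getElem?_take_of_lt hc8', ← PySem.List.pyGet?_natCast]
    exact hcQ

-- introduction forms for the two disjuncts of D_ (stated over the fetched row)
theorem mkD1 (cb : List (List String)) (kr kc : Int) (q : List (List Int)) (row : List String)
    (hrow : PySem.List.pyGet? cb kr = some row) (h18 : kc = -1 ∨ kc = 8)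
    (hq : ∃ c ∈ List.range row.length,
      ((c : Int) < 8 ∧ PySem.List.pyGet? row (c : Int) = some "Q")) :
    D_row_checker cb kr kc q := by
  simp only [D_row_checker, hrow, Option.getD_some]
  exact Or.inl ⟨h18, (memTake_iff row).mpr hq⟩

theorem mkD2 (cb : List (List String)) (kr kc : Int) (q : List (List Int)) (row : List String)
    (hrow : PySem.List.pyGet? cb kr = some row) (hk : 0 ≤ kc ∧ kc < 8)
    (hbig : ∃ c ∈ List.range row.length,
      (8 ≤ (c : Int) ∧ PySem.List.pyGet? row (c : Int) = some "Q"))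
    (hns : ¬ ∃ c ∈ List.range row.length,
      (kc + 1 ≤ (c : Int) ∧ (c : Int) < 8 ∧ PySem.List.pyGet? row (c : Int) = some "Q")) :
    D_row_checker cb kr kc q := by
  simp only [D_row_checker, hrow, Option.getD_some]
  exact Or.inr ⟨hk.1, hk.2, (memDrop_iff row).mpr hbig,
    fun hm => hns ((memMid_iff row kc hk.1).mp hm)⟩

-- elimination: D_'s row-level content, given the fetched row
theorem unD (cb : List (List String)) (kr kc : Int) (q : List (List Int)) (row : List String)
    (hrow : PySem.List.pyGet? cb kr = some row) (hD : D_row_checker cb kr kc q) :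
    ((kc = -1 ∨ kc = 8) ∧ ∃ c ∈ List.range row.length,
      ((c : Int) < 8 ∧ PySem.List.pyGet? row (c : Int) = some "Q"))
    ∨ ((0 ≤ kc ∧ kc < 8) ∧
        (∃ c ∈ List.range row.length,
          (8 ≤ (c : Int) ∧ PySem.List.pyGet? row (c : Int) = some "Q")) ∧
        ¬ ∃ c ∈ List.range row.length,
          (kc + 1 ≤ (c : Int) ∧ (c : Int) < 8 ∧ PySem.List.pyGet? row (c : Int) = some "Q")) := by
  simp only [D_row_checker, hrow, Option.getD_some] at hD
  rcases hD with ⟨h18, hq⟩ | ⟨h0, h8, hbig, hns⟩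
  · exact Or.inl ⟨h18, (memTake_iff row).mp hq⟩
  · exact Or.inr ⟨⟨h0, h8⟩, (memDrop_iff row).mp hbig,
      fun he => hns ((memMid_iff row kc h0).mpr he)⟩

-- ===== VERDICT (by name: the statements are the Claim_ definitions above) =====
theorem row_checker_spec : Claim_unchanged_row_checker := by
  intro cb kr kc q _ hpre
  unfold Spec_row_checker
  intro hnD
  by_cases hk : 0 ≤ kc ∧ kc < 8
  · -- the king stands on a board file
    have hin : PySem.Raise.InRange cb.length kr := by
      obtain ⟨h1, h2⟩ := hpre
      by_cases h7 : kc ≤ 6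
      · exact (h2 ⟨by omega, by omega⟩).1
      · exact (h1 ⟨by omega, by omega⟩).1
    obtain ⟨row, hrow⟩ : ∃ r, PySem.List.pyGet? cb kr = some r := by
      rcases h : PySem.List.pyGet? cb kr with _ | r
      · exact absurd ((PySem.List.pyGet?_eq_none_iff cb kr).mp h) (not_not.mpr hin)
      · exact ⟨r, rfl⟩
    simp only [row_checker, row_checker_alt, hrow, Option.getD_some]
    rw [if_neg (not_not_intro hk)]
    rw [scanA_down cb kr row hrow 9 (kc + -1) (by omega) (by omega),
      scanA_up cb kr row hrow 9 (kc + 1) (by omega) (by omega),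
      B_left_char row kc (by omega), B_right_char row kc]
    have hPL : ∀ k, row.length ≤ k →
        (decide (kc + 1 ≤ (k : Int) ∧ PySem.List.pyGet? row (k : Int) = some "Q")) = false := by
      intro k hkL
      have : row[k]? = none := List.getElem?_eq_none hkL
      simp [PySem.List.pyGet?_natCast, this]
    have htr : ((List.range row.length).filter
          (fun k : Nat => decide (kc + 1 ≤ (k : Int) ∧ PySem.List.pyGet? row (k : Int) = some "Q"))).head?
        = ((List.range 8).filter
          (fun k : Nat => decide (kc + 1 ≤ (k : Int) ∧ PySem.List.pyGet? row (k : Int) = some "Q"))).head? := by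
      apply head?_transfer _ _ hPL
      by_cases hQ : ∃ k : Nat, k < 8 ∧
          (decide (kc + 1 ≤ (k : Int) ∧ PySem.List.pyGet? row (k : Int) = some "Q")) = true
      · exact Or.inl hQ
      · refine Or.inr ?_
        intro k h8k
        by_contra hPk
        have hPk' : kc + 1 ≤ (k : Int) ∧ PySem.List.pyGet? row (k : Int) = some "Q" := by
          simpa using hPk
        refine hnD (mkD2 cb kr kc q row hrow hk
          ⟨k, List.mem_range.mpr (qcol_lt row k hPk'.2), by exact_mod_cast h8k, hPk'.2⟩ ?_)
        rintro ⟨c, hcm, hc1, hc2, hc3⟩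
        exact hQ ⟨c, by exact_mod_cast hc2, by simp [hc1, hc3]⟩
    have hm : (((List.range row.length).filter
          (fun k : Nat => decide (kc + 1 ≤ (k : Int) ∧ PySem.List.pyGet? row (k : Int) = some "Q"))).map
        (fun k : Nat => ((k : Int)))).head?
        = (((List.range 8).filter
          (fun k : Nat => decide (kc + 1 ≤ (k : Int) ∧ PySem.List.pyGet? row (k : Int) = some "Q"))).map
        (fun k : Nat => ((k : Int)))).head? := by
      rw [List.head?_map, List.head?_map, htr]
    rw [hm]
  · -- the king is off the board's files: B returns the list unchanged
    have hB : row_checker_alt cb kr kc q = q := by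
      simp only [row_checker_alt]; rw [if_pos hk]
    rw [hB]
    by_cases h1 : kc = -1
    · subst h1
      have hin : PySem.Raise.InRange cb.length kr := (hpre.2 ⟨by omega, by omega⟩).1
      obtain ⟨row, hrow⟩ : ∃ r, PySem.List.pyGet? cb kr = some r := by
        rcases h : PySem.List.pyGet? cb kr with _ | r
        · exact absurd ((PySem.List.pyGet?_eq_none_iff cb kr).mp h) (not_not.mpr hin)
        · exact ⟨r, rfl⟩
      have hup := scanA_up cb kr row hrow 9 (-1 + 1) (by omega) (by omega)
      have hfl : (List.range 8).filter
          (fun k : Nat => decide ((-1 : Int) + 1 ≤ (k : Int) ∧ PySem.List.pyGet? row (k : Int) = some "Q")) = [] := by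
        apply List.filter_eq_nil_iff.mpr
        intro a ha
        simp only [decide_eq_true_eq, not_and]
        intro _ hQ
        exact absurd (mkD1 cb kr (-1) q row hrow (Or.inl rfl)
          ⟨a, List.mem_range.mpr (qcol_lt row a hQ), by exact_mod_cast List.mem_range.mp ha, hQ⟩) hnD
      rw [hfl] at hup
      simp only [row_checker, scan_dead cb kr (-1) (-1 + -1) (by omega), hup,
        List.map_nil, List.head?_nil]
    · by_cases h8 : kc = 8
      · subst h8
        have hin : PySem.Raise.InRange cb.length kr := (hpre.1 ⟨by omega, by omega⟩).1
        obtain ⟨row, hrow⟩ : ∃ r, PySem.List.pyGet? cb kr = some r := by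
          rcases h : PySem.List.pyGet? cb kr with _ | r
          · exact absurd ((PySem.List.pyGet?_eq_none_iff cb kr).mp h) (not_not.mpr hin)
          · exact ⟨r, rfl⟩
        have hdn := scanA_down cb kr row hrow 9 ((8 : Int) + -1) (by omega) (by omega)
        have hfl : (List.range 8).filter
            (fun k : Nat => decide ((k : Int) ≤ (8 : Int) + -1 ∧ PySem.List.pyGet? row (k : Int) = some "Q")) = [] := by
          apply List.filter_eq_nil_iff.mpr
          intro a ha
          simp only [decide_eq_true_eq, not_and]
          intro _ hQ
          exact absurd (mkD1 cb kr 8 q row hrow (Or.inr rfl)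
            ⟨a, List.mem_range.mpr (qcol_lt row a hQ), by exact_mod_cast List.mem_range.mp ha, hQ⟩) hnD
        rw [hfl] at hdn
        simp only [row_checker, scan_dead cb kr 1 ((8 : Int) + 1) (by omega), hdn,
          List.map_nil, List.getLast?_nil]
      · -- k_col at least two files off the board: neither scan starts on it
        simp only [row_checker,
          scan_dead cb kr (-1) (kc + -1) (by omega),
          scan_dead cb kr 1 (kc + 1) (by omega)]

theorem row_checker_changed : Claim_changed_row_checker := by
  unfold Claim_changed_row_checker; decide

theorem row_checker_tight : Claim_exact_row_checker := by
  intro cb kr kc q _ hpre hD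
  obtain ⟨row, hrow⟩ : ∃ r, PySem.List.pyGet? cb kr = some r := by
    rcases h : PySem.List.pyGet? cb kr with _ | r
    · exfalso
      simp only [D_row_checker, h] at hD
      simp at hD
    · exact ⟨r, rfl⟩
  rcases unD cb kr kc q row hrow hD with ⟨hk18, c, hcm, hc8, hcQ⟩ | ⟨hk, ⟨c, hcm, hc8, hcQ⟩, hns⟩
  · -- a king just off the files with a queen on its row: A captures, B does not
    have hB : row_checker_alt cb kr kc q = q := by
      simp only [row_checker_alt]
      rw [if_pos (by rcases hk18 with rfl | rfl <;> omega)]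
    rcases hk18 with rfl | rfl
    · have hup := scanA_up cb kr row hrow 9 (-1 + 1) (by omega) (by omega)
      have hmem : c ∈ (List.range 8).filter
          (fun k : Nat => decide ((-1 : Int) + 1 ≤ (k : Int) ∧ PySem.List.pyGet? row (k : Int) = some "Q")) :=
        List.mem_filter.mpr ⟨List.mem_range.mpr (by exact_mod_cast hc8), by simp [hcQ]⟩
      obtain ⟨r0, hr0⟩ : ∃ r0, (((List.range 8).filter
          (fun k : Nat => decide ((-1 : Int) + 1 ≤ (k : Int) ∧ PySem.List.pyGet? row (k : Int) = some "Q"))).map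
          (fun k : Nat => ((k : Int)))).head? = some r0 := by
        cases hfl : (List.range 8).filter
            (fun k : Nat => decide ((-1 : Int) + 1 ≤ (k : Int) ∧ PySem.List.pyGet? row (k : Int) = some "Q")) with
        | nil => rw [hfl] at hmem; simp at hmem
        | cons a t =>
          exact ⟨(a : Int), by simp⟩
      rw [hr0] at hup
      have hA : row_checker cb kr (-1) q = q ++ [[kr, r0]] := by
        simp only [row_checker, scan_dead cb kr (-1) (-1 + -1) (by omega), hup]
      rw [hA, hB]
      intro heq
      have := congrArg List.length heq
      simp at this
    · have hdn := scanA_down cb kr row hrow 9 ((8 : Int) + -1) (by omega) (by omega)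
      have hmem : c ∈ (List.range 8).filter
          (fun k : Nat => decide ((k : Int) ≤ (8 : Int) + -1 ∧ PySem.List.pyGet? row (k : Int) = some "Q")) :=
        List.mem_filter.mpr ⟨List.mem_range.mpr (by exact_mod_cast hc8), by simp [hcQ]; omega⟩
      obtain ⟨l0, hl0⟩ : ∃ l0, (((List.range 8).filter
          (fun k : Nat => decide ((k : Int) ≤ (8 : Int) + -1 ∧ PySem.List.pyGet? row (k : Int) = some "Q"))).map
          (fun k : Nat => ((k : Int)))).getLast? = some l0 := by
        have hne : (((List.range 8).filter
            (fun k : Nat => decide ((k : Int) ≤ (8 : Int) + -1 ∧ PySem.List.pyGet? row (k : Int) = some "Q"))).map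
            (fun k : Nat => ((k : Int)))) ≠ [] := by
          intro hnil
          rw [List.map_eq_nil_iff] at hnil
          rw [hnil] at hmem
          simp at hmem
        cases hgl : (((List.range 8).filter
            (fun k : Nat => decide ((k : Int) ≤ (8 : Int) + -1 ∧ PySem.List.pyGet? row (k : Int) = some "Q"))).map
            (fun k : Nat => ((k : Int)))).getLast? with
        | none => exact absurd (List.getLast?_eq_none_iff.mp hgl) hne
        | some l => exact ⟨l, rfl⟩
      rw [hl0] at hdn
      have hA : row_checker cb kr 8 q = q ++ [[kr, l0]] := by
        simp only [row_checker, scan_dead cb kr 1 ((8 : Int) + 1) (by omega), hdn]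
      rw [hA, hB]
      intro heq
      have := congrArg List.length heq
      simp at this
  · -- a king on the files whose only rightward queen sits past column 7: B reports it, A not
    have hupA := scanA_up cb kr row hrow 9 (kc + 1) (by omega) (by omega)
    have hflA : (List.range 8).filter
        (fun k : Nat => decide (kc + 1 ≤ (k : Int) ∧ PySem.List.pyGet? row (k : Int) = some "Q")) = [] := by
      apply List.filter_eq_nil_iff.mpr
      intro a ha
      simp only [decide_eq_true_eq, not_and]
      intro hle hQ
      exact absurd ⟨a, List.mem_range.mpr (qcol_lt row a hQ), hle,
        by exact_mod_cast List.mem_range.mp ha, hQ⟩ hns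
    rw [hflA] at hupA
    have hmem : c ∈ (List.range row.length).filter
        (fun k : Nat => decide (kc + 1 ≤ (k : Int) ∧ PySem.List.pyGet? row (k : Int) = some "Q")) :=
      List.mem_filter.mpr ⟨hcm, by simp [hcQ]; omega⟩
    obtain ⟨r0, hr0⟩ : ∃ r0, (((List.range row.length).filter
        (fun k : Nat => decide (kc + 1 ≤ (k : Int) ∧ PySem.List.pyGet? row (k : Int) = some "Q"))).map
        (fun k : Nat => ((k : Int)))).head? = some r0 := by
      cases hfl : (List.range row.length).filter
          (fun k : Nat => decide (kc + 1 ≤ (k : Int) ∧ PySem.List.pyGet? row (k : Int) = some "Q")) with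
      | nil => rw [hfl] at hmem; simp at hmem
      | cons a t =>
        exact ⟨(a : Int), by simp⟩
    have hA : row_checker cb kr kc q =
        (match (((List.range 8).filter
            (fun k : Nat => decide ((k : Int) ≤ kc + -1 ∧ PySem.List.pyGet? row (k : Int) = some "Q"))).map
          (fun k : Nat => ((k : Int)))).getLast? with
          | some l => q ++ [[kr, l]]
          | none => q) := by
      simp only [row_checker, hupA, List.map_nil, List.head?_nil,
        scanA_down cb kr row hrow 9 (kc + -1) (by omega) (by omega)]
    have hBv : row_checker_alt cb kr kc q =
        (match (((List.range 8).filter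
            (fun k : Nat => decide ((k : Int) ≤ kc + -1 ∧ PySem.List.pyGet? row (k : Int) = some "Q"))).map
          (fun k : Nat => ((k : Int)))).getLast? with
          | some l => q ++ [[kr, l]]
          | none => q) ++ [[kr, r0]] := by
      simp only [row_checker_alt, hrow, Option.getD_some]
      rw [if_neg (not_not_intro hk), B_left_char row kc (by omega), B_right_char row kc, hr0]
    rw [hA, hBv]
    intro heq
    have := congrArg List.length heq
    cases hgl : (((List.range 8).filter
        (fun k : Nat => decide ((k : Int) ≤ kc + -1 ∧ PySem.List.pyGet? row (k : Int) = some "Q"))).map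
      (fun k : Nat => ((k : Int)))).getLast? with
    | none => rw [hgl] at this; simp at this
    | some l => rw [hgl] at this; simp at this
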